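-- pv_equiv track=rewrite | github.com/aptolon/projectodm | functions.py | base_security_setting_value
-- ===== SOURCE A (Python) =====
-- def base_security_setting_value(defect_counts: dict[str, int]) -> int:
--
--     counter = 0
--     i = 0
--     for value in defect_counts.values():
--         i += 1
--         if value != 0:
--             counter = i
--
--     base_value = 6 - counter
--     return base_value
-- ===== SOURCE B (Python) =====
-- def base_security_setting_value(defect_counts: dict[str, int]) -> int:
--     vals = list(defect_counts.values())
--     for idx in range(len(vals) - 1, -1, -1):
--         if vals[idx] != 0:
--             return 6 - (idx + 1)
--     return 6
-- ===== Notes on version B (the rewrite author's own statement) =====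
-- stated objective: alternative
-- what changed: Replaces the forward full scan that keeps overwriting a counter with a reverse scan over the materialised values that returns 6-(idx+1) at the first nonzero value found from the end (6 if none).
import Mathlib
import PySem

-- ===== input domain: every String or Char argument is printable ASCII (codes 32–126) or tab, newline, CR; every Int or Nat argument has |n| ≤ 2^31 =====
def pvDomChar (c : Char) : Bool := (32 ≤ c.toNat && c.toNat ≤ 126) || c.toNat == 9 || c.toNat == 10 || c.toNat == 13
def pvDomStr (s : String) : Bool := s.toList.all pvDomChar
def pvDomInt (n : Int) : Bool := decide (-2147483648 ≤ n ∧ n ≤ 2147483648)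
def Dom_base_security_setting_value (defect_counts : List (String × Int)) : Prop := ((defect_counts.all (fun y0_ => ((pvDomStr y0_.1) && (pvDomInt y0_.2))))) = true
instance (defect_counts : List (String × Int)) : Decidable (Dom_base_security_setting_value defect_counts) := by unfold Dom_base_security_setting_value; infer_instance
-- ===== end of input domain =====

-- ===== PORT A =====
-- forward scan: state (counter, i); counter := i whenever value ≠ 0
def base_security_setting_value (defect_counts : List (String × Int)) : Int :=
  let st := (defect_counts.map Prod.snd).foldl
    (fun (p : Int × Int) value =>
      let i := p.2 + 1
      (if value ≠ 0 then i else p.1, i)) (0, 0)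
  6 - st.1

-- ===== PORT B =====
-- reverse scan with early exit: check indices len-1 … 0, return 6-(idx+1) at first nonzero
def altLoop (vals : List Int) : Nat → Int
  | 0 => 6
  | k + 1 => if vals.getD k 0 ≠ 0 then 6 - ((k : Int) + 1) else altLoop vals k

def base_security_setting_value_alt (defect_counts : List (String × Int)) : Int :=
  let vals := defect_counts.map Prod.snd
  altLoop vals vals.length

-- ===== PRECONDITION & SPEC =====
def Spec_base_security_setting_value (defect_counts : List (String × Int)) (out : Int) : Prop := out = base_security_setting_value_alt defect_counts
instance (defect_counts : List (String × Int)) (out : Int) : Decidable (Spec_base_security_setting_value defect_counts out) := by unfold Spec_base_security_setting_value; infer_instance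

-- ===== CLAIM (what is proved, stated in full; the proofs are below) =====
def Claim_equal_base_security_setting_value : Prop := ∀ (defect_counts : List (String × Int)), Dom_base_security_setting_value defect_counts → Spec_base_security_setting_value defect_counts (base_security_setting_value defect_counts)

-- ===== LEMMAS AND PROOFS =====

def fwdStep (p : Int × Int) (value : Int) : Int × Int :=
  (if value ≠ 0 then p.2 + 1 else p.1, p.2 + 1)

lemma fwdStep_eq (p : Int × Int) (v : Int) :
    (fun (p : Int × Int) value =>
      let i := p.2 + 1
      (if value ≠ 0 then i else p.1, i)) p v = fwdStep p v := rfl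

lemma foldl_snd (vs : List Int) : ∀ c i : Int, (vs.foldl fwdStep (c, i)).2 = i + vs.length := by
  induction vs with
  | nil => intro c i; simp
  | cons v vs ih =>
    intro c i
    simp only [List.foldl_cons, fwdStep, ih, List.length_cons]
    push_cast; ring

lemma altLoop_append (vals : List Int) (x : Int) :
    ∀ k, k ≤ vals.length → altLoop (vals ++ [x]) k = altLoop vals k := by
  intro k
  induction k with
  | zero => intro _; rfl
  | succ k ih =>
    intro hk
    have hk' : k < vals.length := hk
    simp only [altLoop, List.getD_append _ _ _ _ hk', ih (le_of_lt hk')]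

lemma main_lemma (vs : List Int) :
    6 - (vs.foldl fwdStep (0, 0)).1 = altLoop vs vs.length := by
  induction vs using List.reverseRecOn with
  | nil => simp [altLoop]
  | append_singleton xs x ih =>
    rw [List.foldl_append]
    have hsnd : (xs.foldl fwdStep ((0 : Int), (0 : Int))).2 = (xs.length : Int) := by
      simpa using foldl_snd xs 0 0
    simp only [List.foldl_cons, List.foldl_nil, List.length_append, List.length_singleton]
    have : altLoop (xs ++ [x]) (xs.length + 1) =
        if x ≠ 0 then 6 - ((xs.length : Int) + 1) else altLoop xs xs.length := by
      simp only [altLoop, List.getD_append_right _ _ _ _ (le_refl _), Nat.sub_self]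
      by_cases hx : x = 0
      · simp [hx, altLoop_append xs 0 xs.length (le_refl _)]
      · simp [hx]
    rw [this]
    by_cases hx : x = 0 <;> simp [fwdStep, hx, hsnd, ← ih]


-- ===== VERDICT (by name: the statement is the Claim_ definition above) =====
theorem base_security_setting_value_spec : Claim_equal_base_security_setting_value := by
  intro ds _
  show _ = _
  unfold base_security_setting_value base_security_setting_value_alt
  simp only [fwdStep_eq]
  have := main_lemma (ds.map Prod.snd)
  simp only [fwdStep] at this ⊢
  exact this
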